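-- pv_equiv track=rewrite | github.com/beninghton/notGivenUpToG | Arrays/561. Array Partition I.py | arrayPairSum_elegant
-- ===== SOURCE A (Python) =====
-- def arrayPairSum_elegant(nums):
--     array = [0]*20
--     total = 0
--
--     for el in nums:
--         array[el+10] += 1
--
--     odd = True
--
--     for i,freq in enumerate(array):
--
--         while freq > 0:
--             if odd:
--                 total += i - 10
--
--             odd = not odd
--             freq -= 1
--
--
--     return total
-- ===== SOURCE B (Python) =====
-- def arrayPairSum_elegant(nums):
--     counts = [0] * 20
--     for el in nums:
--         counts[el + 10] += 1
--     total = 0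
--     seen = 0
--     for i, c in enumerate(counts):
--         # of the c copies of value i-10, the ones landing on even global
--         # positions are pair minima; count them arithmetically
--         total += (i - 10) * ((c + 1) // 2 if seen % 2 == 0 else c // 2)
--         seen += c
--     return total
-- ===== Notes on version B (the rewrite author's own statement) =====
-- stated objective: alternative
-- what changed: Keeps the 20-bin histogram but replaces A's per-element bin walk (inner while loop toggling an odd flag) with a closed-form per-bin count of pair minima: each bin contributes (c+1)//2 or c//2 copies of its value depending on the running parity; Pre_ excludes lists with an element outside [-30, 9], on which both programs raise IndexError.
import Mathlib
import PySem

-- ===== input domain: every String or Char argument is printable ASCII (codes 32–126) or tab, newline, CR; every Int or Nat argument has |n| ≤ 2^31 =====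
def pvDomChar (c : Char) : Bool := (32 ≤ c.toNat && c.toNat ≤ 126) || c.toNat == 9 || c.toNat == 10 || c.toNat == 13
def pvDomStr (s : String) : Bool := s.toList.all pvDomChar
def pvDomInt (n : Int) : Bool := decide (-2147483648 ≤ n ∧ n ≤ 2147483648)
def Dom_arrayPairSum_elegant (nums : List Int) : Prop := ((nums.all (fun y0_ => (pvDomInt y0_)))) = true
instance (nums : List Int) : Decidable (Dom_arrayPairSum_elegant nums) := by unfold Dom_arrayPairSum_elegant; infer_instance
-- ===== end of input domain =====

-- B keeps the 20-bin histogram but replaces A's per-element bin walk (odd flag, inner while) with a closed-form per-bin count of pair minima (alternative decomposition; not claimed faster).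

-- ===== PORT A =====
-- array[el+10] += 1  (Python indexing: negative index wraps; out of range = IndexError, excluded by Pre_)
def pvStep (arr : List Int) (el : Int) : List Int :=
  PySem.List.pySetD arr (el + 10) (PySem.List.pyGetD arr (el + 10) 0 + 1)

-- the first for-loop of A: the count array after all increments
def pvCount (nums : List Int) : List Int :=
  nums.foldl pvStep (List.replicate 20 0)

-- the inner 'while freq > 0' of A: runs freq times, toggling odd, adding i-10 on odd steps
def pvWhileA (i : Int) : Nat → Bool → Int → Bool × Int
  | 0, odd, total => (odd, total)
  | Nat.succ k, odd, total => pvWhileA i k (!odd) (if odd then total + (i - 10) else total)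

def arrayPairSum_elegant (nums : List Int) : Int :=
  let array := pvCount nums
  let st := (PySem.List.enumerate array 0).foldl
    (fun (st : Bool × Int) p => pvWhileA p.1 p.2.toNat st.1 st.2) (true, 0)
  st.2

-- ===== PORT B =====
-- the body of Source B's second loop: state (total, seen)
def pvBStep (st : Int × Int) (p : Int × Int) : Int × Int :=
  (st.1 + (p.1 - 10) *
      (if PySem.Int.mod st.2 2 = 0 then PySem.Int.floordiv (p.2 + 1) 2
       else PySem.Int.floordiv p.2 2),
   st.2 + p.2)

def arrayPairSum_elegant_alt (nums : List Int) : Int :=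
  let counts := nums.foldl
    (fun (counts : List Int) el =>
      PySem.List.pySetD counts (el + 10) (PySem.List.pyGetD counts (el + 10) 0 + 1))
    (List.replicate 20 0)
  ((PySem.List.enumerate counts 0).foldl pvBStep (0, 0)).1

-- ===== PRECONDITION & SPEC =====
-- Pre_ admits exactly the inputs on which A returns: any element below -30 or above 9 makes A (and B) raise IndexError.
def Pre_arrayPairSum_elegant (nums : List Int) : Prop :=
  ∀ el ∈ nums, -30 ≤ el ∧ el ≤ 9
instance (nums : List Int) : Decidable (Pre_arrayPairSum_elegant nums) := by
  unfold Pre_arrayPairSum_elegant; infer_instance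

def pvWitness_arrayPairSum_elegant : List Int := [1, 2, 3, -4]

def Spec_arrayPairSum_elegant (nums : List Int) (out : Int) : Prop :=
  out = arrayPairSum_elegant_alt nums
instance (nums : List Int) (out : Int) : Decidable (Spec_arrayPairSum_elegant nums out) := by
  unfold Spec_arrayPairSum_elegant; infer_instance

-- ===== CLAIM (what is proved, stated in full; the proofs are below) =====
def Claim_equal_arrayPairSum_elegant : Prop :=
  ∀ (nums : List Int), Dom_arrayPairSum_elegant nums → Pre_arrayPairSum_elegant nums →
    Spec_arrayPairSum_elegant nums (arrayPairSum_elegant nums)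

-- ===== LEMMAS AND PROOFS =====

-- the abstract alternating machine both sides reduce to: consume a list, toggling a flag, summing flagged elements
def pvConsume : List Int → Bool → Int → Bool × Int
  | [], odd, total => (odd, total)
  | x :: xs, odd, total => pvConsume xs (!odd) (if odd then total + x else total)

lemma pvWhileA_eq_consume (i : Int) :
    ∀ (n : Nat) (odd : Bool) (total : Int),
      pvWhileA i n odd total = pvConsume (List.replicate n (i - 10)) odd total := by
  intro n
  induction n with
  | zero => intro odd total; simp [pvWhileA, pvConsume]
  | succ k ih => intro odd total; simp [pvWhileA, pvConsume, List.replicate_succ, ih]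

lemma pvConsume_append :
    ∀ (xs ys : List Int) (odd : Bool) (total : Int),
      pvConsume (xs ++ ys) odd total = pvConsume ys (pvConsume xs odd total).1 (pvConsume xs odd total).2 := by
  intro xs
  induction xs with
  | nil => intro ys odd total; simp [pvConsume]
  | cons x t ih => intro ys odd total; simp [pvConsume, ih]

lemma pvFoldA_eq :
    ∀ (ps : List (Int × Int)) (odd : Bool) (total : Int),
      ps.foldl (fun (st : Bool × Int) p => pvWhileA p.1 p.2.toNat st.1 st.2) (odd, total)
        = pvConsume ((ps.map (fun p => List.replicate p.2.toNat (p.1 - 10))).flatten) odd total := by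
  intro ps
  induction ps with
  | nil => intro odd total; simp [pvConsume]
  | cons p t ih =>
    intro odd total
    simp only [List.foldl_cons, List.map_cons, List.flatten_cons]
    rw [pvConsume_append, pvWhileA_eq_consume]
    have := ih (pvConsume (List.replicate p.2.toNat (p.1 - 10)) odd total).1
               (pvConsume (List.replicate p.2.toNat (p.1 - 10)) odd total).2
    simpa using this

-- closed form of the machine on a constant block
lemma pvConsume_replicate (v : Int) :
    ∀ (n : Nat) (odd : Bool) (total : Int),
      pvConsume (List.replicate n v) odd total
        = (xor (decide (n % 2 = 1)) odd,
           total + v * (((if odd then (n + 1) / 2 else n / 2 : Nat)) : Int)) := by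
  intro n
  induction n with
  | zero => intro odd total; simp [pvConsume]
  | succ k ih =>
    intro odd total
    rw [List.replicate_succ]
    show pvConsume (List.replicate k v) (!odd) (if odd then total + v else total) = _
    rw [ih]
    cases odd with
    | true =>
      by_cases h : k % 2 = 0
      · have h1 : (k + 1) % 2 = 1 := by omega
        have h2 : (k + 1 + 1) / 2 = k / 2 + 1 := by omega
        simp [h, h1, h2]; ring
      · have h0 : k % 2 = 1 := by omega
        have h1 : (k + 1) % 2 = 0 := by omega
        have h2 : (k + 1 + 1) / 2 = k / 2 + 1 := by omega
        simp [h0, h1, h2]; ring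
    | false =>
      by_cases h : k % 2 = 0
      · have h1 : (k + 1) % 2 = 1 := by omega
        simp [h, h1]
      · have h0 : k % 2 = 1 := by omega
        have h1 : (k + 1) % 2 = 0 := by omega
        simp [h0, h1]

-- B's parity fold computes exactly what the machine computes on the flattened blocks
lemma pvBfold_eq_consume :
    ∀ (ps : List (Int × Int)) (total seen : Int), 0 ≤ seen → (∀ p ∈ ps, 0 ≤ p.2) →
      (ps.foldl pvBStep (total, seen)).1
        = (pvConsume ((ps.map (fun p => List.replicate p.2.toNat (p.1 - 10))).flatten)
            (decide (PySem.Int.mod seen 2 = 0)) total).2 := by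
  intro ps
  induction ps with
  | nil => intro total seen _ _; simp [pvConsume]
  | cons p t ih =>
    intro total seen hs hpos
    obtain ⟨i, c⟩ := p
    have hc : 0 ≤ c := hpos (i, c) (List.mem_cons_self)
    have hmods : PySem.Int.mod seen 2 = seen % 2 := PySem.Int.mod_eq_emod_of_pos (by omega)
    have hmods' : PySem.Int.mod (seen + c) 2 = (seen + c) % 2 :=
      PySem.Int.mod_eq_emod_of_pos (by omega)
    simp only [List.foldl_cons, List.map_cons, List.flatten_cons]
    rw [pvConsume_append, pvConsume_replicate]
    have hfd1 : PySem.Int.floordiv (c + 1) 2 = (((c.toNat + 1) / 2 : Nat) : Int) := by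
      rw [PySem.Int.floordiv_eq_ediv_of_pos (by omega : (0:Int) < 2)]; omega
    have hfd2 : PySem.Int.floordiv c 2 = ((c.toNat / 2 : Nat) : Int) := by
      rw [PySem.Int.floordiv_eq_ediv_of_pos (by omega : (0:Int) < 2)]; omega
    have hval : (pvBStep (total, seen) (i, c)).1
        = total + (i - 10) * (((if decide (PySem.Int.mod seen 2 = 0) = true
            then (c.toNat + 1) / 2 else c.toNat / 2 : Nat)) : Int) := by
      show total + (i - 10) * (if PySem.Int.mod seen 2 = 0
          then PySem.Int.floordiv (c + 1) 2 else PySem.Int.floordiv c 2) = _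
      by_cases h : PySem.Int.mod seen 2 = 0
      · rw [if_pos h, hfd1, if_pos (by rw [decide_eq_true_eq]; exact h)]
      · rw [if_neg h, hfd2, if_neg (by rw [decide_eq_true_eq]; exact h)]
    have hflag : decide (PySem.Int.mod (seen + c) 2 = 0)
        = xor (decide (c.toNat % 2 = 1)) (decide (PySem.Int.mod seen 2 = 0)) := by
      rw [hmods, hmods']
      by_cases h1 : seen % 2 = 0 <;> by_cases h2 : c.toNat % 2 = 1
      · have ha : (seen + c) % 2 = 1 := by omega
        simp [h1, h2, ha]
      · have ha : (seen + c) % 2 = 0 := by omega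
        simp [h1, h2, ha]
      · have ha : (seen + c) % 2 = 0 := by omega
        simp [h1, h2, ha]
      · have ha : (seen + c) % 2 = 1 := by omega
        simp [h1, h2, ha]
    have hstep : pvBStep (total, seen) (i, c)
        = ((pvBStep (total, seen) (i, c)).1, seen + c) := by
      unfold pvBStep; rfl
    rw [hstep, ih _ (seen + c) (by omega) (fun q hq => hpos q (List.mem_cons_of_mem _ hq))]
    rw [hval, hflag]

-- every element the pyGetD-with-default-0 / pySetD counting fold produces is nonnegative
lemma pvGetD_cases {α : Type} (xs : List α) (i : Int) (d : α) :
    PySem.List.pyGetD xs i d ∈ xs ∨ PySem.List.pyGetD xs i d = d := by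
  rcases h : PySem.List.pyGet? xs i with _ | x
  · right; simp [PySem.List.pyGetD, h]
  · left
    have hx : PySem.List.pyGetD xs i d = x := by simp [PySem.List.pyGetD, h]
    rw [hx]
    unfold PySem.List.pyGet? at h
    rcases hk : PySem.List.pyIdx? xs.length i with _ | k
    · simp [hk] at h
    · simp only [hk, Option.bind_some] at h
      exact List.mem_of_getElem? h

lemma pvSetD_cases {α : Type} (xs : List α) (i : Int) (v x : α)
    (h : x ∈ PySem.List.pySetD xs i v) : x ∈ xs ∨ x = v := by
  unfold PySem.List.pySetD PySem.List.pySet? at h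
  rcases hk : PySem.List.pyIdx? xs.length i with _ | k
  · rw [hk] at h
    exact Or.inl (by simpa using h)
  · rw [hk] at h
    simp only [Option.map_some, Option.getD_some] at h
    rcases List.mem_or_eq_of_mem_set h with h' | rfl
    · exact Or.inl h'
    · exact Or.inr rfl

lemma pvCount_nonneg :
    ∀ (l arr : List Int), (∀ x ∈ arr, 0 ≤ x) → ∀ x ∈ l.foldl pvStep arr, 0 ≤ x := by
  intro l
  induction l with
  | nil => intro arr h; exact h
  | cons el t ih =>
    intro arr h
    refine ih (pvStep arr el) ?_
    intro x hx
    rcases pvSetD_cases _ _ _ _ hx with h' | rfl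
    · exact h x h'
    · rcases pvGetD_cases arr (el + 10) (0 : Int) with h' | h'
      · have := h _ h'; omega
      · omega

-- every second component of enumerate is an element of the list
lemma pvEnumerate_snd_mem {α : Type} :
    ∀ (xs : List α) (s : Int) (p : Int × α), p ∈ PySem.List.enumerate xs s → p.2 ∈ xs := by
  intro xs
  induction xs with
  | nil => intro s p hp; simp [PySem.List.enumerate_nil] at hp
  | cons x t ih =>
    intro s p hp
    rw [PySem.List.enumerate_cons] at hp
    rcases List.mem_cons.mp hp with rfl | hp
    · exact List.mem_cons_self
    · exact List.mem_cons_of_mem _ (ih (s + 1) p hp)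

-- ===== VERDICT (by name: the statement is the Claim_ definition above) =====
theorem arrayPairSum_elegant_spec : Claim_equal_arrayPairSum_elegant := by
  intro nums _ _
  show arrayPairSum_elegant nums = arrayPairSum_elegant_alt nums
  have hA : arrayPairSum_elegant nums
      = (pvConsume (((PySem.List.enumerate (pvCount nums) 0).map
          (fun p => List.replicate p.2.toNat (p.1 - 10))).flatten) true 0).2 := by
    unfold arrayPairSum_elegant
    exact congrArg Prod.snd (pvFoldA_eq (PySem.List.enumerate (pvCount nums) 0) true 0)
  have hB : arrayPairSum_elegant_alt nums
      = ((PySem.List.enumerate (pvCount nums) 0).foldl pvBStep (0, 0)).1 := rfl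
  rw [hA, hB]
  rw [pvBfold_eq_consume (PySem.List.enumerate (pvCount nums) 0) 0 0 le_rfl
      (fun p hp => pvCount_nonneg nums (List.replicate 20 0) (by simp) p.2
        (pvEnumerate_snd_mem _ _ _ hp))]
  norm_num [PySem.Int.mod]
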